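-- pv_equiv track=rewrite | github.com/nikolai5slo/algo_sales_acceleration | predict_combined.py | combine_union
-- ===== SOURCE A (Python) =====
-- def combine_union(predictedBuyers, predictedProducts):
--     product_buyers = {product: buyers for product, buyers in predictedBuyers}
--     buyer_products = {buyer: products for buyer, products in predictedProducts}
--
--     predicted = []
--     for product, buyers in product_buyers.items():
--         newbuyers = [buyer for buyer, products in buyer_products.items() if product in products]
--         predicted.append((product, buyers + newbuyers))
--     return predicted
-- ===== SOURCE B (Python) =====
-- def combine_union(predictedBuyers, predictedProducts):
--     product_buyers = dict(predictedBuyers)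
--     buyer_products = dict(predictedProducts)
--     index = {}
--     for buyer, products in buyer_products.items():
--         for p in set(products):
--             index.setdefault(p, []).append(buyer)
--     return [(p, buyers + index.get(p, [])) for p, buyers in product_buyers.items()]
-- ===== Notes on version B (the rewrite author's own statement) =====
-- stated objective: faster
-- what changed: Instead of rescanning every buyer's product list for each product (nested scans), B inverts buyer_products once into a product->buyers index and then does a single lookup per product.
import Mathlib
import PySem

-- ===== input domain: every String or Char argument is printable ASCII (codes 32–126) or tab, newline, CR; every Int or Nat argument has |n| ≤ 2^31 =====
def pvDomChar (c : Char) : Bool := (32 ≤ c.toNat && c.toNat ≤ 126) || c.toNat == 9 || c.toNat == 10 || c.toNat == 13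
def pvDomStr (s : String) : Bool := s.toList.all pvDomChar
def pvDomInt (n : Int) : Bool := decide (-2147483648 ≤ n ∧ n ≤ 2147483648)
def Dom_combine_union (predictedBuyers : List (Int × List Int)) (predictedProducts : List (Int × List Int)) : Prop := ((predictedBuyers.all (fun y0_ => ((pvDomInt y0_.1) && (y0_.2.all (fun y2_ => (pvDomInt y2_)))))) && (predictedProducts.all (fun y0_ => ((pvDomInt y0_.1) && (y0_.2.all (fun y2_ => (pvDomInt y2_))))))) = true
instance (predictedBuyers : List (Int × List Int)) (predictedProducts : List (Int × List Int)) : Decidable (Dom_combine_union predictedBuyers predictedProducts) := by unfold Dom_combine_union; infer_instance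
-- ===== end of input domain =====

-- B replaces A's per-product scan of all buyers by a one-pass product→buyers inverted index (faster, asymptotic).

-- ===== PORT A =====
def combine_union (predictedBuyers : List (Int × List Int)) (predictedProducts : List (Int × List Int)) : List (Int × List Int) :=
  let product_buyers := PySem.Dict.ofList predictedBuyers
  let buyer_products := PySem.Dict.ofList predictedProducts
  -- for product, buyers in product_buyers.items(): predicted.append((product, buyers + newbuyers))
  product_buyers.items.foldl
    (fun predicted pb =>
      let newbuyers := (buyer_products.items.filter (fun bp => decide (pb.1 ∈ bp.2))).map Prod.fst
      predicted ++ [(pb.1, pb.2 ++ newbuyers)])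
    []

-- ===== PORT B =====
def combine_union_alt (predictedBuyers : List (Int × List Int)) (predictedProducts : List (Int × List Int)) : List (Int × List Int) :=
  let product_buyers := PySem.Dict.ofList predictedBuyers
  let buyer_products := PySem.Dict.ofList predictedProducts
  -- for buyer, products in buyer_products.items(): for p in set(products): index.setdefault(p, []).append(buyer)
  let index := buyer_products.items.foldl
    (fun d bp => (PySem.Set.ofList bp.2).foldl (fun d p => d.modify p [] (· ++ [bp.1])) d)
    PySem.Dict.empty
  product_buyers.items.map (fun pb => (pb.1, pb.2 ++ index.getD pb.1 []))

-- ===== PRECONDITION & SPEC =====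
def Spec_combine_union (predictedBuyers : List (Int × List Int)) (predictedProducts : List (Int × List Int)) (out : List (Int × List Int)) : Prop := out = combine_union_alt predictedBuyers predictedProducts
instance (predictedBuyers : List (Int × List Int)) (predictedProducts : List (Int × List Int)) (out : List (Int × List Int)) : Decidable (Spec_combine_union predictedBuyers predictedProducts out) := by unfold Spec_combine_union; infer_instance

-- ===== CLAIM (what is proved, stated in full; the proofs are below) =====
def Claim_equal_combine_union : Prop := ∀ (predictedBuyers : List (Int × List Int)) (predictedProducts : List (Int × List Int)), Dom_combine_union predictedBuyers predictedProducts → Spec_combine_union predictedBuyers predictedProducts (combine_union predictedBuyers predictedProducts)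

-- ===== LEMMAS AND PROOFS =====

-- filtering a duplicate-free list for one value yields that value at most once
theorem filter_eq_of_nodup (l : List Int) (p : Int) (h : l.Nodup) :
    l.filter (fun q => q == p) = if p ∈ l then [p] else [] := by
  induction l with
  | nil => simp
  | cons a t ih =>
    rw [List.nodup_cons] at h
    obtain ⟨ha, ht⟩ := h
    by_cases hap : a = p
    · subst hap
      simp [ih ht, ha]
    · simp [hap, ih ht, Ne.symm hap]

-- inner loop: adding one buyer to every product of set(products)
theorem inner_getD (d : PySem.Dict Int (List Int)) (b : Int) (prods : List Int) (p : Int) :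
    ((PySem.Set.ofList prods).foldl (fun d q => d.modify q [] (· ++ [b])) d).getD p []
      = d.getD p [] ++ (if p ∈ prods then [b] else []) := by
  have hmap : (PySem.Set.ofList prods).foldl (fun d q => d.modify q [] (· ++ [b])) d
      = ((PySem.Set.ofList prods).map (fun q => (q, b))).foldl (fun d x => d.modify x.1 [] (· ++ [x.2])) d := by
    rw [List.foldl_map]
  rw [hmap, PySem.Dict.getD_foldl_modify_append]
  have hfil : ((PySem.Set.ofList prods).map (fun q => (q, b))).filter (fun x => x.1 == p)
      = ((PySem.Set.ofList prods).filter (fun q => q == p)).map (fun q => (q, b)) := by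
    rw [List.filter_map]; rfl
  rw [hfil, filter_eq_of_nodup _ _ (PySem.Set.nodup_ofList prods)]
  by_cases hp : p ∈ prods
  · simp [hp, PySem.Set.mem_ofList]
  · simp [hp, PySem.Set.mem_ofList]

-- the inverted index at p collects exactly the buyers whose product list contains p, in order
theorem index_getD (l : List (Int × List Int)) (d : PySem.Dict Int (List Int)) (p : Int) :
    (l.foldl (fun d bp => (PySem.Set.ofList bp.2).foldl (fun d q => d.modify q [] (· ++ [bp.1])) d) d).getD p []
      = d.getD p [] ++ (l.filter (fun bp => decide (p ∈ bp.2))).map Prod.fst := by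
  induction l generalizing d with
  | nil => simp
  | cons a t ih =>
    simp only [List.foldl_cons, ih, inner_getD, List.filter_cons]
    by_cases hp : p ∈ a.2 <;> simp [hp]

theorem foldl_append_eq_map {α β : Type} (l : List α) (f : α → β) (acc : List β) :
    l.foldl (fun acc x => acc ++ [f x]) acc = acc ++ l.map f := by
  induction l generalizing acc with
  | nil => simp
  | cons a t ih => simp [ih]

theorem combine_union_spec : Claim_equal_combine_union := by
  intro predictedBuyers predictedProducts _
  unfold Spec_combine_union combine_union combine_union_alt
  rw [foldl_append_eq_map, List.nil_append]
  exact List.map_congr_left (fun pb _ => by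
    rw [index_getD, PySem.Dict.getD_empty, List.nil_append])
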